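-- pv_equiv track=rewrite | github.com/admsolutions/antvirus | 2.0admav.py | _analyze_file_operations
-- ===== SOURCE A (Python) =====
-- BEHAVIOR_PATTERNS = {
--     'file_operations': [
--         'write', 'delete', 'modify', 'execute',
--         'create_file', 'delete_file', 'rename_file'
--     ],
--     'network_operations': [
--         'connect', 'listen', 'send', 'receive',
--         'download', 'upload'
--     ],
--     'system_operations': [
--         'registry_modify', 'service_create', 'process_inject',
--         'privilege_escalation'
--     ]
-- }
--
-- def _analyze_file_operations(ops):
--     score = 0
--     suspicious_patterns = {
--         'multiple_delete': 5,
--         'rapid_create': 3,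
--         'sensitive_modify': 4
--     }
--
--     for op in ops:
--         if op in BEHAVIOR_PATTERNS['file_operations']:
--             score += 1
--         if op == 'delete' and len([x for x in ops if x == 'delete']) > 3:
--             score += suspicious_patterns['multiple_delete']
--
--     return score
-- ===== SOURCE B (Python) =====
-- BEHAVIOR_PATTERNS = {
--     'file_operations': [
--         'write', 'delete', 'modify', 'execute',
--         'create_file', 'delete_file', 'rename_file'
--     ],
--     'network_operations': [
--         'connect', 'listen', 'send', 'receive',
--         'download', 'upload'
--     ],
--     'system_operations': [
--         'registry_modify', 'service_create', 'process_inject',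
--         'privilege_escalation'
--     ]
-- }
--
-- def _analyze_file_operations(ops):
--     counts = {}
--     for op in ops:
--         counts[op] = counts.get(op, 0) + 1
--     score = sum(counts.get(kw, 0) for kw in BEHAVIOR_PATTERNS['file_operations'])
--     d = counts.get('delete', 0)
--     if d > 3:
--         score += 5 * d
--     return score
-- ===== Notes on version B (the rewrite author's own statement) =====
-- stated objective: simpler
-- what changed: Replaces A's per-element loop (with an inner re-count of 'delete' under the loop) by a single frequency table: count all ops once, sum the counts of the fixed keyword list, and add 5*counts['delete'] once when it exceeds 3.
import Mathlib
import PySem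

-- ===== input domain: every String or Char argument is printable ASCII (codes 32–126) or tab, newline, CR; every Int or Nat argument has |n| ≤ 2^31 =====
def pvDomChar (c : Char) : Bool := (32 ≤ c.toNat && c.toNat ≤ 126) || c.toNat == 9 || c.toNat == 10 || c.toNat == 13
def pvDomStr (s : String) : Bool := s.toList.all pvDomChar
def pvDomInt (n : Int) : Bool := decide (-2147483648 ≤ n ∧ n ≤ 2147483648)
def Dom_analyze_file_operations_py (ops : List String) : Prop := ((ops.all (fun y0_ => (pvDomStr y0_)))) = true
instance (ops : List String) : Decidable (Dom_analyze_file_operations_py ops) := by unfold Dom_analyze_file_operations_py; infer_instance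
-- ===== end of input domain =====

-- One-line summary (objective: simpler): B replaces A's per-element loop with its inner
-- re-count of 'delete' by a single frequency table summed over the fixed keyword list.


-- BEHAVIOR_PATTERNS['file_operations']
def pvFileOps : List String :=
  ["write", "delete", "modify", "execute", "create_file", "delete_file", "rename_file"]

-- ===== PORT A =====
def analyze_file_operations_py (ops : List String) : Int :=
  ops.foldl (fun score op =>
    let score := if pvFileOps.contains op then score + 1 else score
    if op == "delete" && decide ((ops.filter (fun x => x == "delete")).length > 3)
    then score + 5 else score) 0

-- ===== PORT B =====
def analyze_file_operations_py_alt (ops : List String) : Int :=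
  let counts : PySem.Dict String Int :=
    ops.foldl (fun d op => d.insert op (d.getD op 0 + 1)) PySem.Dict.empty
  let score := pvFileOps.foldl (fun s kw => s + counts.getD kw 0) 0
  let d := counts.getD "delete" 0
  if d > 3 then score + 5 * d else score

-- ===== PRECONDITION & SPEC =====
def Spec_analyze_file_operations_py (ops : List String) (out : Int) : Prop := out = analyze_file_operations_py_alt ops
instance (ops : List String) (out : Int) : Decidable (Spec_analyze_file_operations_py ops out) := by unfold Spec_analyze_file_operations_py; infer_instance

-- ===== CLAIM (what is proved, stated in full; the proofs are below) =====
def Claim_equal_analyze_file_operations_py : Prop := ∀ (ops : List String), Dom_analyze_file_operations_py ops → Spec_analyze_file_operations_py ops (analyze_file_operations_py ops)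

-- ===== LEMMAS AND PROOFS =====

-- A's loop, over any prefix l with the "multiple_delete" test fixed by the full list (a constant
-- Bool b), equals: membership count plus (if b) 5 per 'delete' in l.
lemma loopA (b : Bool) (l : List String) (s : Int) :
    l.foldl (fun score op =>
      let score := if pvFileOps.contains op then score + 1 else score
      if op == "delete" && b then score + 5 else score) s
    = s + (l.countP (fun op => pvFileOps.contains op) : Int)
        + (if b then 5 * (l.count "delete" : Int) else 0) := by
  induction l generalizing s with
  | nil => simp
  | cons x l ih =>
      simp only [List.foldl_cons, ih, List.countP_cons, List.count_cons]
      cases b <;> by_cases hx : x = "delete" <;>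
        simp [hx, pvFileOps] <;> (try split_ifs) <;> ring

-- membership count = sum of the per-keyword counts (the keywords are distinct)
-- per-element contribution: membership indicator = sum of the seven equality indicators
lemma indicator_eq (x : String) :
    (if pvFileOps.contains x then (1 : Nat) else 0)
    = (if x == "write" then (1 : Nat) else 0) + (if x == "delete" then 1 else 0)
      + (if x == "modify" then 1 else 0) + (if x == "execute" then 1 else 0)
      + (if x == "create_file" then 1 else 0) + (if x == "delete_file" then 1 else 0)
      + (if x == "rename_file" then 1 else 0) := by
  by_cases h : x ∈ pvFileOps
  · simp only [pvFileOps, List.mem_cons, List.not_mem_nil, or_false] at h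
    rcases h with h | h | h | h | h | h | h <;> subst h <;> decide
  · simp only [pvFileOps, List.mem_cons, List.not_mem_nil, or_false, not_or] at h
    obtain ⟨h1, h2, h3, h4, h5, h6, h7⟩ := h
    have hc : pvFileOps.contains x = false := by
      simp [pvFileOps, h1, h2, h3, h4, h5, h6, h7]
    rw [hc, beq_eq_false_iff_ne.mpr h1, beq_eq_false_iff_ne.mpr h2,
      beq_eq_false_iff_ne.mpr h3, beq_eq_false_iff_ne.mpr h4,
      beq_eq_false_iff_ne.mpr h5, beq_eq_false_iff_ne.mpr h6,
      beq_eq_false_iff_ne.mpr h7]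
    simp

-- membership count = sum of the per-keyword counts (the keywords are distinct)
lemma countP_mem_eq (l : List String) :
    l.countP (fun op => pvFileOps.contains op)
    = l.count "write" + l.count "delete" + l.count "modify" + l.count "execute"
      + l.count "create_file" + l.count "delete_file" + l.count "rename_file" := by
  induction l with
  | nil => simp
  | cons x l ih =>
      simp only [List.countP_cons, List.count_cons, ih]
      rw [indicator_eq]
      ring

-- filter-length = count
lemma filter_len_eq_count (l : List String) :
    (l.filter (fun x => x == "delete")).length = l.count "delete" := by
  simp [List.count_eq_countP, List.countP_eq_length_filter]

-- ===== VERDICT (by name: the statement is the Claim_ definition above) =====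
theorem analyze_file_operations_py_spec : Claim_equal_analyze_file_operations_py := by
  intro ops _
  unfold Spec_analyze_file_operations_py analyze_file_operations_py analyze_file_operations_py_alt
  rw [loopA, countP_mem_eq]
  simp only [PySem.Dict.getD_foldl_insert_add_one, PySem.Dict.getD_empty, pvFileOps,
    List.foldl_cons, List.foldl_nil, filter_len_eq_count, decide_eq_true_eq]
  push_cast
  split_ifs <;> omega
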